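-- pv_equiv track=rewrite | github.com/BigJman123/muhgame | game/Verb???.py | list_prefix
-- ===== SOURCE A (Python) =====
-- def list_prefix(a, b):  # is a a prefix of b
--   if not a:
--     return True
--   if not b:
--     return False
--   if a[0] != b[0]:
--     return False
--   return list_prefix(a[1:], b[1:])
-- ===== SOURCE B (Python) =====
-- def list_prefix(a, b):  # is a a prefix of b
--   if len(a) > len(b):
--     return False
--   for i in range(len(a)):
--     if a[i] != b[i]:
--       return False
--   return True
-- ===== Notes on version B (the rewrite author's own statement) =====
-- stated objective: simpler
-- what changed: Replaces structural recursion on sliced tails with a length guard plus a single index loop comparing a[i] with b[i].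
import Mathlib
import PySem

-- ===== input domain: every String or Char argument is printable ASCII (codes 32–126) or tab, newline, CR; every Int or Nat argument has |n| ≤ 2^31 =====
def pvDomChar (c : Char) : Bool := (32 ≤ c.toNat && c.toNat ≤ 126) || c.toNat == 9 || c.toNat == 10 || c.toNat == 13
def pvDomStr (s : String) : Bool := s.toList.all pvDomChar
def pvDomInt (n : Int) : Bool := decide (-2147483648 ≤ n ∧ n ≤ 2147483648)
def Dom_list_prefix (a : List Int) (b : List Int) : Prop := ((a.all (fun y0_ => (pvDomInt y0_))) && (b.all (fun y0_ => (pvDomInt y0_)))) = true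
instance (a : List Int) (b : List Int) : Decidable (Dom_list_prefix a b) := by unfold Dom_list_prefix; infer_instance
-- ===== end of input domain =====

-- B replaces A's structural recursion on sliced tails with a length guard plus a single index loop (alternative decomposition, same result).


-- ===== PORT A =====
def list_prefix (a : List Int) (b : List Int) : Bool :=
  match a, b with
  | [], _ => true
  | _ :: _, [] => false
  | x :: a', y :: b' =>
    if x ≠ y then false
    else list_prefix a' b'

-- ===== PORT B =====
-- 'for i in range(len(a))': fuel counts the remaining iterations, i is the index
def lpLoop (a b : List Int) : Nat → Nat → Bool
  | 0, _ => true
  | fuel + 1, i =>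
    if PySem.List.pyGet? a ((i : Int)) ≠ PySem.List.pyGet? b ((i : Int)) then false
    else lpLoop a b fuel (i + 1)

def list_prefix_alt (a : List Int) (b : List Int) : Bool :=
  if a.length > b.length then false
  else lpLoop a b a.length 0

-- ===== PRECONDITION & SPEC =====
def Spec_list_prefix (a : List Int) (b : List Int) (out : Bool) : Prop := out = list_prefix_alt a b
instance (a : List Int) (b : List Int) (out : Bool) : Decidable (Spec_list_prefix a b out) := by unfold Spec_list_prefix; infer_instance

-- ===== CLAIM (what is proved, stated in full; the proofs are below) =====
def Claim_equal_list_prefix : Prop := ∀ (a : List Int) (b : List Int), Dom_list_prefix a b → Spec_list_prefix a b (list_prefix a b)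

-- ===== LEMMAS AND PROOFS =====

theorem lpLoop_cons (x y : Int) (a b : List Int) (fuel i : Nat) :
    lpLoop (x :: a) (y :: b) fuel (i + 1) = lpLoop a b fuel i := by
  induction fuel generalizing i with
  | zero => rfl
  | succ f ih =>
    simp only [lpLoop]
    have hc : ((i + 1 : Nat) : Int) = (i : Int) + 1 := by push_cast; ring
    rw [hc, PySem.List.pyGet?_cons_succ x a i, PySem.List.pyGet?_cons_succ y b i, ih]

theorem list_prefix_eq_alt (a b : List Int) : list_prefix a b = list_prefix_alt a b := by
  induction a generalizing b with
  | nil => cases b <;> rfl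
  | cons x a' ih =>
    cases b with
    | nil => rfl
    | cons y b' =>
      simp only [list_prefix, list_prefix_alt, List.length_cons] at *
      by_cases hxy : x = y
      · have hrec := ih b'
        simp only [hxy, ne_eq, not_true_eq_false, if_false]
        by_cases hlen : a'.length > b'.length
        · simp [hlen, hrec, Nat.succ_lt_succ hlen]
        · have : ¬ (a'.length + 1 > b'.length + 1) := by omega
          simp only [hlen, if_false] at hrec
          simp only [this, if_false, lpLoop]
          have h0 : ((0 : Nat) : Int) = (0 : Int) := rfl
          rw [h0, PySem.List.pyGet?_zero_cons, PySem.List.pyGet?_zero_cons]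
          simp only [ne_eq, not_true_eq_false, if_false]
          rw [show (0 : Nat) + 1 = 0 + 1 from rfl, lpLoop_cons, hrec]
      · by_cases hlen : a'.length + 1 > b'.length + 1
        · simp [hxy, hlen]
        · simp only [hxy, ne_eq, not_false_eq_true, if_true, hlen, if_false, lpLoop]
          have h0 : ((0 : Nat) : Int) = (0 : Int) := rfl
          rw [h0, PySem.List.pyGet?_zero_cons, PySem.List.pyGet?_zero_cons]
          simp [hxy]

-- ===== VERDICT (by name: the statement is the Claim_ definition above) =====
theorem list_prefix_spec : Claim_equal_list_prefix := by
  intro a b _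
  exact list_prefix_eq_alt a b
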